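-- pv_equiv track=rewrite | github.com/DarkPr0digy/MORPH_SEGMENT | Conditional Random Fields/Neural CRF Model/Neural CRF.py | get_surface_segments
-- ===== SOURCE A (Python) =====
-- def get_surface_segments(surface: str):
--     """
--     Method to extract the segments from the orthographic form of the word
--     :param orthographic: the orthographic form of the word
--     :return: list of all the segments in the word
--     """
--     segments = []
--     tmp = ''
--     label = False
--
--     # Get all segments from orthographic form
--     for char in surface:
--         if char == '[':
--             segments.append(tmp)
--             tmp = ''
--             label = True
--         elif char == ']':
--             label = False
--         elif not label:
--             tmp += char
--     return segments
-- ===== SOURCE B (Python) =====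
-- def get_surface_segments(surface: str):
--     pieces = surface.split('[')
--     if len(pieces) == 1:
--         return []
--     first = pieces[0].replace(']', '')
--     return [first] + [p.partition(']')[2].replace(']', '') for p in pieces[1:-1]]
-- ===== Notes on version B (the rewrite author's own statement) =====
-- stated objective: simpler
-- what changed: Replaced the char-by-char label/tmp state machine with a split on the opening bracket followed by per-piece extraction: the text before the first opening bracket and, for each piece between brackets, the text after its first closing bracket, with remaining closing brackets removed via str.replace.
import Mathlib
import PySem

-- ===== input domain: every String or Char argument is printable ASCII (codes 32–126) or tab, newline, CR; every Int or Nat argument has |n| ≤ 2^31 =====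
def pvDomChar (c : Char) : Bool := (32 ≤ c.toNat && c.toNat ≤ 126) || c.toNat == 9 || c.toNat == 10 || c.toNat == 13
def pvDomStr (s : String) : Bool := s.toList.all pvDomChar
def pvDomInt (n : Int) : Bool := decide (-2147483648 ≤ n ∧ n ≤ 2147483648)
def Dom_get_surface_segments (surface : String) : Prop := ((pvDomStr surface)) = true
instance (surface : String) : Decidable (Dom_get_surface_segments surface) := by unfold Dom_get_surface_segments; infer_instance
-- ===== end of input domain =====

-- B replaces A's char-by-char label/tmp state machine by split('[') plus per-piece partition(']')/replace(']',''); objective: simpler.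

-- ===== PORT A =====
-- the loop body of A's `for char in surface`; state = (segments, tmp, label)
def gssStep (st : List (List Char) × List Char × Bool) (c : Char) : List (List Char) × List Char × Bool :=
  if c = '[' then (st.1 ++ [st.2.1], ([] : List Char), true)
  else if c = ']' then (st.1, st.2.1, false)
  else if st.2.2 = false then (st.1, st.2.1 ++ [c], st.2.2)
  else st

def get_surface_segments (surface : String) : List String :=
  ((surface.toList.foldl gssStep ([], [], false)).1).map (fun cs => String.ofList cs)

-- ===== PORT B =====
-- p.partition(']')[2]: the chars strictly after the first ']' of p, [] if p has no ']' (exact hand port of str.partition's third component)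
def gssAfterRBrack (p : List Char) : List Char :=
  (p.dropWhile (· ≠ ']')).drop 1

def get_surface_segments_alt (surface : String) : List String :=
  let pieces := PySem.Chars.splitOn surface.toList ['[']
  if pieces.length = 1 then []
  else
    let first := PySem.Chars.replace (PySem.List.pyGetD pieces 0 []) [']'] []
    let mids := PySem.List.slice pieces (some 1) (some (-1))
    String.ofList first :: mids.map (fun p => String.ofList (PySem.Chars.replace (gssAfterRBrack p) [']'] []))

-- ===== PRECONDITION & SPEC =====
def Spec_get_surface_segments (surface : String) (out : List String) : Prop := out = get_surface_segments_alt surface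
instance (surface : String) (out : List String) : Decidable (Spec_get_surface_segments surface out) := by unfold Spec_get_surface_segments; infer_instance

-- ===== CLAIM (what is proved, stated in full; the proofs are below) =====
def Claim_equal_get_surface_segments : Prop := ∀ (surface : String), Dom_get_surface_segments surface → Spec_get_surface_segments surface (get_surface_segments surface)

-- ===== LEMMAS AND PROOFS =====

-- split of a char list at every '[' (what s.split('[') computes), structurally
def sp : List Char → List (List Char)
  | [] => [[]]
  | c :: xs => if c = '[' then [] :: sp xs else (sp xs).modifyHead (c :: ·)

-- all ']' removed (what A does to the chars it keeps, and what replace(']','') does)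
def clean (l : List Char) : List Char := l.filter (· ≠ ']')

theorem sp_ne_nil (l : List Char) : sp l ≠ [] := by
  induction l with
  | nil => simp [sp]
  | cons c xs ih =>
    simp only [sp]
    split
    · simp
    · cases h : sp xs with
      | nil => exact absurd h ih
      | cons a t => simp

theorem go_eq (l : List Char) : ∀ (fuel : Nat) (cur : List Char) (acc : List (List Char)), l.length < fuel →
    PySem.Chars.splitOn.go ['['] fuel l cur acc
      = acc.reverse ++ (sp l).modifyHead (cur.reverse ++ ·) := by
  induction l with
  | nil =>
    intro fuel cur acc h
    match fuel with
    | f + 1 => rw [PySem.Chars.splitOn.go.eq_def]; simp [sp]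
  | cons c rest ih =>
    intro fuel cur acc h
    match fuel with
    | f + 1 =>
      rw [PySem.Chars.splitOn.go.eq_def]
      by_cases hc : c = '['
      · subst hc
        have hp : (['['].isPrefixOf ('[' :: rest)) = true := by
          simp [List.isPrefixOf]
        simp only [hp, if_pos, List.length_cons, List.length_nil, List.drop_succ_cons, List.drop_zero]
        rw [ih f [] (cur.reverse :: acc) (by simpa using Nat.lt_of_succ_lt_succ h)]
        simp [sp]
        cases hs : sp rest with
        | nil => exact absurd hs (sp_ne_nil rest)
        | cons a t => simp
      · have hp : (['['].isPrefixOf (c :: rest)) = false := by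
          simp only [List.isPrefixOf, Bool.and_true, beq_eq_false_iff_ne, ne_eq]
          exact fun h2 => hc h2.symm
        simp only [hp, Bool.false_eq_true, if_false]
        rw [ih f (c :: cur) acc (by simpa using Nat.lt_of_succ_lt_succ h)]
        simp only [sp, if_neg hc]
        cases hs : sp rest with
        | nil => exact absurd hs (sp_ne_nil rest)
        | cons a t => simp

theorem splitOn_eq_sp (l : List Char) : PySem.Chars.splitOn l ['['] = sp l := by
  rw [PySem.Chars.splitOn, go_eq l (l.length + 1) [] [] (by omega)]
  cases h : sp l with
  | nil => exact absurd h (sp_ne_nil l)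
  | cons a t => simp

theorem replace_go_eq (l : List Char) : ∀ (fuel : Nat) (acc : List Char), l.length ≤ fuel →
    PySem.Chars.replace.go [']'] [] fuel l acc = acc.reverse ++ clean l := by
  induction l with
  | nil =>
    intro fuel acc h
    match fuel with
    | 0 => rw [PySem.Chars.replace.go.eq_def]; simp [clean]
    | f + 1 => rw [PySem.Chars.replace.go.eq_def]; simp [clean]
  | cons c rest ih =>
    intro fuel acc h
    match fuel with
    | f + 1 =>
      rw [PySem.Chars.replace.go.eq_def]
      by_cases hc : c = ']'
      · subst hc
        have hp : ([']'].isPrefixOf (']' :: rest)) = true := by simp [List.isPrefixOf]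
        simp only [hp, if_pos, List.length_cons, List.length_nil, List.drop_succ_cons, List.drop_zero,
          List.reverse_nil, List.nil_append]
        rw [ih f acc (by simpa using Nat.le_of_succ_le_succ h)]
        simp [clean]
      · have hp : ([']'].isPrefixOf (c :: rest)) = false := by
          simp only [List.isPrefixOf, Bool.and_true, beq_eq_false_iff_ne, ne_eq]
          exact fun h2 => hc h2.symm
        simp only [hp, Bool.false_eq_true, if_false]
        rw [ih f (c :: acc) (by simpa using Nat.le_of_succ_le_succ h)]
        simp [clean, hc]

theorem replace_eq_clean (l : List Char) : PySem.Chars.replace l [']'] [] = clean l := by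
  rw [PySem.Chars.replace]
  simp only [List.isEmpty_cons, Bool.false_eq_true, if_false]
  exact replace_go_eq l l.length [] (le_refl _)

theorem intercalate_two (a b : List Char) (t : List (List Char)) :
    List.intercalate ['['] (a :: b :: t) = a ++ '[' :: List.intercalate ['['] (b :: t) := by
  simp [List.intercalate, List.intersperse]

theorem intercalate_one (a : List Char) : List.intercalate ['['] [a] = a := by
  simp [List.intercalate]

-- every piece produced by sp contains no '['
theorem sp_no_br (l : List Char) : ∀ p ∈ sp l, '[' ∉ p := by
  induction l with
  | nil =>
    intro p hp
    simp only [sp, List.mem_singleton] at hp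
    simp [hp]
  | cons c rest ih =>
    intro p hp
    simp only [sp] at hp
    by_cases hc : c = '['
    · rw [if_pos hc] at hp
      rcases List.mem_cons.mp hp with h | h
      · simp [h]
      · exact ih p h
    · rw [if_neg hc] at hp
      cases hs : sp rest with
      | nil => exact absurd hs (sp_ne_nil rest)
      | cons a t =>
        rw [hs] at hp
        simp only [List.modifyHead_cons] at hp
        rcases List.mem_cons.mp hp with h | h
        · subst h
          intro hm
          rcases List.mem_cons.mp hm with h2 | h2
          · exact hc h2.symm
          · exact ih a (by simp [hs]) h2
        · exact ih p (by simp [hs, h])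

-- sp reassembles to the original string
theorem sp_intercalate (l : List Char) : List.intercalate ['['] (sp l) = l := by
  induction l with
  | nil => simp [sp, List.intercalate]
  | cons c rest ih =>
    simp only [sp]
    by_cases hc : c = '['
    · subst hc
      rw [if_pos rfl]
      cases hs : sp rest with
      | nil => exact absurd hs (sp_ne_nil rest)
      | cons a t =>
        rw [hs] at ih
        rw [intercalate_two, List.nil_append, ih]
    · rw [if_neg hc]
      cases hs : sp rest with
      | nil => exact absurd hs (sp_ne_nil rest)
      | cons a t =>
        rw [hs] at ih
        cases t with
        | nil =>
          simp only [List.modifyHead_cons, intercalate_one] at ih ⊢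
          rw [ih]
        | cons b t2 =>
          simp only [List.modifyHead_cons, intercalate_two] at ih ⊢
          rw [List.cons_append, ih]

-- evaluation of gssStep on the three kinds of characters
theorem gssStep_br (segs : List (List Char)) (tmp : List Char) (lab : Bool) :
    gssStep (segs, tmp, lab) '[' = (segs ++ [tmp], [], true) := by simp [gssStep]

theorem gssStep_rb (segs : List (List Char)) (tmp : List Char) (lab : Bool) :
    gssStep (segs, tmp, lab) ']' = (segs, tmp, false) := by simp [gssStep]

theorem gssStep_other_false {c : Char} (hc : c ≠ '[') (hc2 : c ≠ ']') (segs : List (List Char)) (tmp : List Char) :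
    gssStep (segs, tmp, false) c = (segs, tmp ++ [c], false) := by simp [gssStep, hc, hc2]

theorem gssStep_other_true {c : Char} (hc : c ≠ '[') (hc2 : c ≠ ']') (segs : List (List Char)) (tmp : List Char) :
    gssStep (segs, tmp, true) c = (segs, tmp, true) := by simp [gssStep, hc, hc2]

-- A's loop over a bracket-free run with label = False: appends the run minus its ']'s to tmp
theorem foldl_no_br_false (l : List Char) : ∀ (segs : List (List Char)) (tmp : List Char), '[' ∉ l →
    l.foldl gssStep (segs, tmp, false) = (segs, tmp ++ clean l, false) := by
  induction l with
  | nil => intro segs tmp _; simp [clean]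
  | cons c rest ih =>
    intro segs tmp hl
    have hc : c ≠ '[' := fun h => hl (by simp [h])
    have hrest : '[' ∉ rest := fun h => hl (by simp [h])
    by_cases hc2 : c = ']'
    · subst hc2
      rw [List.foldl_cons, gssStep_rb, ih segs tmp hrest]
      simp [clean]
    · rw [List.foldl_cons, gssStep_other_false hc hc2, ih segs (tmp ++ [c]) hrest]
      simp [clean, hc2]

-- A's loop over a bracket-free run with label = True: skips up to the first ']', then keeps the rest minus ']'s
theorem foldl_no_br_true (l : List Char) : ∀ (segs : List (List Char)) (tmp : List Char), '[' ∉ l →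
    l.foldl gssStep (segs, tmp, true) = (segs, tmp ++ clean (gssAfterRBrack l), l.all (· ≠ ']')) := by
  induction l with
  | nil => intro segs tmp _; simp [clean, gssAfterRBrack]
  | cons c rest ih =>
    intro segs tmp hl
    have hc : c ≠ '[' := fun h => hl (by simp [h])
    have hrest : '[' ∉ rest := fun h => hl (by simp [h])
    by_cases hc2 : c = ']'
    · subst hc2
      rw [List.foldl_cons, gssStep_rb, foldl_no_br_false rest segs tmp hrest]
      simp [gssAfterRBrack, List.dropWhile]
    · rw [List.foldl_cons, gssStep_other_true hc hc2, ih segs tmp hrest]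
      simp [gssAfterRBrack, List.dropWhile, hc2]

-- A's loop, restarted just after a '[', over the '['-joined remaining pieces: one segment per piece except the last
theorem foldl_mid (ps : List (List Char)) : ∀ (segs : List (List Char)), ps ≠ [] → (∀ p ∈ ps, '[' ∉ p) →
    ((List.intercalate ['['] ps).foldl gssStep (segs, [], true)).1
      = segs ++ ps.dropLast.map (fun p => clean (gssAfterRBrack p)) := by
  induction ps with
  | nil => intro segs h _; exact absurd rfl h
  | cons p rest ih =>
    intro segs _ hnb
    cases rest with
    | nil =>
      rw [intercalate_one, foldl_no_br_true p segs [] (hnb p (by simp))]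
      simp
    | cons q rest2 =>
      rw [intercalate_two, List.foldl_append, foldl_no_br_true p segs [] (hnb p (by simp)),
        List.foldl_cons, gssStep_br,
        ih (segs ++ [[] ++ clean (gssAfterRBrack p)]) (by simp) (fun r hr => hnb r (by simp [hr]))]
      simp

-- xs[1:-1] on a list with at least two elements
theorem slice_one_neg_one (a : List Char) (xs : List (List Char)) :
    PySem.List.slice (a :: xs) (some 1) (some (-1)) = xs.dropLast := by
  simp only [PySem.List.slice, PySem.List.clampIdx, List.dropLast_eq_take]
  norm_num
  rw [if_neg (by omega)]
  omega

-- ===== VERDICT (by name: the statement is the Claim_ definition above) =====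
theorem get_surface_segments_spec : Claim_equal_get_surface_segments := by
  intro surface _
  unfold Spec_get_surface_segments get_surface_segments get_surface_segments_alt
  rw [splitOn_eq_sp]
  cases hs : sp surface.toList with
  | nil => exact absurd hs (sp_ne_nil surface.toList)
  | cons p0 rest =>
    have hre : surface.toList = List.intercalate ['['] (p0 :: rest) := by
      rw [← hs, sp_intercalate]
    have hnb := sp_no_br surface.toList
    rw [hs] at hnb
    cases rest with
    | nil =>
      -- no '[' in the input: both sides return []
      have hp0 : surface.toList = p0 := by rw [hre, intercalate_one]
      rw [if_pos (by simp)]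
      rw [hp0, foldl_no_br_false p0 [] [] (hnb p0 (by simp))]
      simp
    | cons q rest2 =>
      rw [if_neg (by simp)]
      rw [hre, intercalate_two, List.foldl_append, foldl_no_br_false p0 [] [] (hnb p0 (by simp)),
        List.foldl_cons, gssStep_br,
        foldl_mid (q :: rest2) _ (by simp) (fun r hr => hnb r (by simp [hr]))]
      rw [slice_one_neg_one, replace_eq_clean]
      simp [PySem.List.pyGetD_zero_cons, replace_eq_clean]
      rfl
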